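-- pv_equiv track=rewrite | github.com/davidar/deepbot | unified_bot.py | _convert_small_font_to_think_tags
-- ===== SOURCE A (Python) =====
-- def _convert_small_font_to_think_tags(content):
--     """
--     Convert small font lines (-# prefix) to <think></think> tags for the LLM.
--
--     Lines with -# prefix are wrapped in <think></think> tags,
--     while regular lines are preserved as is.
--     """
--     # Check if there are any lines with the small font prefix
--     if not any(line.startswith("-# ") for line in content.split("\n")):
--         return content
--
--     # Split the content into lines
--     lines = content.split("\n")
--     processed_lines = []
--
--     # Track consecutive small font lines
--     small_font_lines = []
--
--     # Process each line
--     for line in lines: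
--         if line.startswith("-# "):
--             # This is a small font line - add to the current group
--             small_font_lines.append(line[3:])  # Remove the -# prefix
--         else:
--             # This is a regular line
--
--             # If we have accumulated small font lines, wrap them in think tags
--             if small_font_lines:
--                 processed_lines.append("<think>")
--                 processed_lines.extend(small_font_lines)
--                 processed_lines.append("</think>")
--                 small_font_lines = []
--
--             # Add the regular line
--             processed_lines.append(line)
--
--     # If we have any remaining small font lines at the end, wrap them too
--     if small_font_lines:
--         processed_lines.append("<think>")
--         processed_lines.extend(small_font_lines)
--         processed_lines.append("</think>")
--
--     # Join the processed lines back into a single string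
--     return "\n".join(processed_lines)
-- ===== SOURCE B (Python) =====
-- def _convert_small_font_to_think_tags(content):
--     # Run-based rewrite: scan runs of "-# " lines with two indices and emit each
--     # run wrapped in think tags; no accumulator/flush state, no any() pre-check.
--     lines = content.split("\n")
--     out = []
--     i, n = 0, len(lines)
--     while i < n:
--         if lines[i].startswith("-# "):
--             j = i
--             while j < n and lines[j].startswith("-# "):
--                 j += 1
--             out.append("<think>")
--             out.extend(line[3:] for line in lines[i:j])
--             out.append("</think>")
--             i = j
--         else:
--             out.append(lines[i])
--             i += 1
--     return "\n".join(out)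
-- ===== Notes on version B (the rewrite author's own statement) =====
-- stated objective: idiomatic
-- what changed: Replaces A's accumulator-and-flush state machine (plus its redundant any() pre-check and end-of-input flush) with a stateless two-index scan that finds each maximal run of '-# ' lines and emits it wrapped in think tags in one place.
import Mathlib
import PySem

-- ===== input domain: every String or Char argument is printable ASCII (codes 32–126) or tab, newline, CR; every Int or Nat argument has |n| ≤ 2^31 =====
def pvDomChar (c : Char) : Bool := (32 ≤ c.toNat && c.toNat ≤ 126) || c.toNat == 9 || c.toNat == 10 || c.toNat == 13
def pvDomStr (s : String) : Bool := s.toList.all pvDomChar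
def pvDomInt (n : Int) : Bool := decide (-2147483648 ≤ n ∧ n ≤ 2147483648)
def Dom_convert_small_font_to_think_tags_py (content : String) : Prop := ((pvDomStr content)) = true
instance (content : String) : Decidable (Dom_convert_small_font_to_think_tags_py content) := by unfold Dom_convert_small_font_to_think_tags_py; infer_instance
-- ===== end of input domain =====

-- B replaces A's accumulator-and-flush state machine (and its redundant any() pre-check)
-- with a stateless run-based scan; same output, proved equal on all printable-ASCII input.


-- ===== PORT A =====
-- the for-loop over lines with the `processed_lines`/`small_font_lines` accumulators,
-- including the final flush after the loop
def convertA_loop (lines processed small : List String) : List String :=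
  match lines with
  | [] =>
    if small ≠ [] then processed ++ ["<think>"] ++ small ++ ["</think>"] else processed
  | line :: rest =>
    if PySem.Str.startswith line "-# " then
      convertA_loop rest processed (small ++ [PySem.Str.slice line (some 3) none])
    else
      if small ≠ [] then
        convertA_loop rest (processed ++ ["<think>"] ++ small ++ ["</think>"] ++ [line]) []
      else
        convertA_loop rest (processed ++ [line]) []

def convert_small_font_to_think_tags_py (content : String) : String :=
  let lines := (PySem.Str.split? content "\n").getD []
  if ¬ (lines.any (fun l => PySem.Str.startswith l "-# ")) then content
  else PySem.Str.join "\n" (convertA_loop lines [] [])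

-- ===== PORT B =====
-- Source B's two-index run scan: the inner `while j < n and lines[j].startswith(...)` is the
-- takeWhile/dropWhile split of the remaining lines at the end of the current run
def convertB_loop (lines : List String) : List String :=
  match lines with
  | [] => []
  | line :: rest =>
    if PySem.Str.startswith line "-# " then
      ("<think>" ::
        (line :: rest.takeWhile (fun l => PySem.Str.startswith l "-# ")).map
          (fun l => PySem.Str.slice l (some 3) none) ++ ["</think>"])
        ++ convertB_loop (rest.dropWhile (fun l => PySem.Str.startswith l "-# "))
    else
      line :: convertB_loop rest
termination_by lines.length
decreasing_by
  · simpa using Nat.lt_succ_of_le (List.length_dropWhile_le _ _)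
  · simp

def convert_small_font_to_think_tags_py_alt (content : String) : String :=
  PySem.Str.join "\n" (convertB_loop ((PySem.Str.split? content "\n").getD []))

-- ===== PRECONDITION & SPEC =====
def Spec_convert_small_font_to_think_tags_py (content : String) (out : String) : Prop := out = convert_small_font_to_think_tags_py_alt content
instance (content : String) (out : String) : Decidable (Spec_convert_small_font_to_think_tags_py content out) := by unfold Spec_convert_small_font_to_think_tags_py; infer_instance

-- ===== CLAIM (what is proved, stated in full; the proofs are below) =====
def Claim_equal_convert_small_font_to_think_tags_py : Prop := ∀ (content : String), Dom_convert_small_font_to_think_tags_py content → Spec_convert_small_font_to_think_tags_py content (convert_small_font_to_think_tags_py content)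

-- ===== LEMMAS AND PROOFS =====

-- A's loop with both accumulators, related to B's run scan: starting with an empty small-font
-- buffer A appends exactly B's output; with a nonempty buffer it appends the open think group
-- extended by the run at the head of the remaining lines, then continues as B.
theorem convertA_loop_eq_B (lines : List String) :
    (∀ processed, convertA_loop lines processed [] = processed ++ convertB_loop lines) ∧
    (∀ processed small, small ≠ [] →
      convertA_loop lines processed small =
        processed ++ "<think>" :: small
          ++ (lines.takeWhile (fun l => PySem.Str.startswith l "-# ")).map
              (fun l => PySem.Str.slice l (some 3) none)
          ++ "</think>" :: convertB_loop (lines.dropWhile (fun l => PySem.Str.startswith l "-# "))) := by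
  induction lines with
  | nil =>
    constructor
    · intro processed; simp [convertA_loop, convertB_loop]
    · intro processed small h; simp [convertA_loop, convertB_loop, h]
  | cons line rest ih =>
    constructor
    · intro processed
      by_cases hp : PySem.Str.startswith line "-# " = true
      · rw [convertA_loop, if_pos hp]
        simp only [List.nil_append]
        rw [ih.2 _ _ (by simp), convertB_loop, if_pos hp]
        simp
      · rw [convertA_loop, if_neg hp, if_neg (by simp), ih.1, convertB_loop, if_neg hp]
        simp
    · intro processed small h
      by_cases hp : PySem.Str.startswith line "-# " = true
      · rw [convertA_loop, if_pos hp, ih.2 _ _ (by simp),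
            List.takeWhile_cons_of_pos (by simpa using hp),
            List.dropWhile_cons_of_pos (by simpa using hp)]
        simp
      · rw [convertA_loop, if_neg hp, if_pos h, ih.1,
            List.takeWhile_cons_of_neg (by simpa using hp),
            List.dropWhile_cons_of_neg (by simpa using hp),
            convertB_loop, if_neg hp]
        simp

-- B's scan is the identity when no line carries the prefix
theorem convertB_loop_id (lines : List String)
    (h : lines.all (fun l => !PySem.Str.startswith l "-# ") = true) :
    convertB_loop lines = lines := by
  induction lines with
  | nil => simp [convertB_loop]
  | cons line rest ih =>
    simp only [List.all_cons, Bool.and_eq_true, Bool.not_eq_true'] at h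
    rw [convertB_loop, if_neg (by simpa using h.1), ih h.2]

-- joining two adjacent pieces around one sep
theorem chars_join_cons_ne (sep a : List Char) (l : List (List Char)) (h : l ≠ []) :
    PySem.Chars.join sep (a :: l) = a ++ sep ++ PySem.Chars.join sep l := by
  cases l with
  | nil => exact absurd rfl h
  | cons b t => exact PySem.Chars.join_cons_cons sep a b t

theorem chars_join_merge (sep : List Char) (X : List (List Char)) (a b : List Char) :
    PySem.Chars.join sep (X ++ [a, b]) = PySem.Chars.join sep (X ++ [a ++ sep ++ b]) := by
  induction X with
  | nil =>
    simp [PySem.Chars.join_cons_cons, PySem.Chars.join_singleton]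
  | cons x X ih =>
    rw [List.cons_append, List.cons_append,
        chars_join_cons_ne sep x _ (by simp), chars_join_cons_ne sep x _ (by simp), ih]

-- joining with sep undoes splitting on sep (Chars level, fuel-based go)
theorem chars_join_go (sep : List Char) (hsep : sep ≠ []) :
    ∀ fuel l cur acc, l.length < fuel →
      PySem.Chars.join sep (PySem.Chars.splitOn.go sep fuel l cur acc) =
        PySem.Chars.join sep (acc.reverse ++ [cur.reverse ++ l]) := by
  intro fuel
  induction fuel with
  | zero => intro l cur acc h; omega
  | succ f ihf =>
    intro l cur acc h
    cases l with
    | nil => simp [PySem.Chars.splitOn.go]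
    | cons c rest =>
      rw [PySem.Chars.splitOn.go]
      by_cases hpre : sep.isPrefixOf (c :: rest) = true
      · rw [if_pos hpre]
        have hp : sep <+: (c :: rest) := List.isPrefixOf_iff_prefix.mp hpre
        have hlen : sep.length ≤ (c :: rest).length := hp.length_le
        have hs1 : 1 ≤ sep.length := by
          cases sep with
          | nil => exact absurd rfl hsep
          | cons _ _ => simp
        have hdrop : (List.drop sep.length (c :: rest)).length < f := by
          simp only [List.length_drop]
          simp only [List.length_cons] at h hlen ⊢
          omega
        rw [ihf _ _ _ hdrop]
        obtain ⟨t, ht⟩ := hp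
        have hdt : List.drop sep.length (c :: rest) = t := by rw [← ht, List.drop_left]
        simp only [List.reverse_cons, List.reverse_nil, List.nil_append, List.append_assoc]
        rw [show acc.reverse ++ ([cur.reverse] ++ [List.drop sep.length (c :: rest)])
              = acc.reverse ++ [cur.reverse, List.drop sep.length (c :: rest)] by simp,
            chars_join_merge, hdt, List.append_assoc, ht]
      · rw [if_neg hpre, ihf _ _ _ (by simpa using Nat.lt_of_succ_lt_succ h)]
        simp

theorem chars_join_splitOn (sep s : List Char) (hsep : sep ≠ []) :
    PySem.Chars.join sep (PySem.Chars.splitOn s sep) = s := by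
  rw [PySem.Chars.splitOn, chars_join_go sep hsep _ _ _ _ (Nat.lt_succ_self _)]
  simp [PySem.Chars.join, List.intercalate]

-- split then join with the same (non-empty) separator reproduces the string
theorem str_join_split (content : String) :
    PySem.Str.join "\n" ((PySem.Str.split? content "\n").getD []) = content := by
  have h : PySem.Chars.join ['\n'] (PySem.Chars.splitOn content.toList ['\n']) = content.toList :=
    chars_join_splitOn ['\n'] content.toList (by simp)
  have hl : (PySem.Str.join "\n" ((PySem.Str.split? content "\n").getD [])).toList = content.toList := by
    simp [PySem.Str.split?, PySem.Chars.split?, PySem.Str.toList_join]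
    simpa [Function.comp_def] using h
  rw [← String.ofList_toList (s := PySem.Str.join "\n" ((PySem.Str.split? content "\n").getD [])),
      hl, String.ofList_toList]

-- ===== VERDICT (by name: the statement is the Claim_ definition above) =====
theorem convert_small_font_to_think_tags_py_spec : Claim_equal_convert_small_font_to_think_tags_py := by
  intro content _
  unfold Spec_convert_small_font_to_think_tags_py
  unfold convert_small_font_to_think_tags_py convert_small_font_to_think_tags_py_alt
  by_cases hany : ((PySem.Str.split? content "\n").getD []).any
      (fun l => PySem.Str.startswith l "-# ") = true
  · rw [if_neg (by simpa using hany)]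
    rw [(convertA_loop_eq_B _).1 []]
    simp
  · rw [if_pos (by simpa using hany)]
    rw [convertB_loop_id _ (by
      simp only [List.all_eq_not_any_not]
      simp only [Bool.not_not]
      simpa using hany)]
    exact (str_join_split content).symm
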